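-- pv_equiv track=rewrite | github.com/nickBes/favory | Scrapers/scrapper/spiders/bug.py | iterate_in_pairs
-- ===== SOURCE A (Python) =====
-- def iterate_in_pairs(iterator):
--     '''
--     iterates over this iterator in pairs.
--     for example given the iterator [1,2,3,4,5,6], the iterator that will be returned is [(1,2), (3,4), (5,6)]
--     '''
--     is_first_item_in_pair = True
--     first_item_in_pair = None
--     for item in iterator:
--         if is_first_item_in_pair:
--             first_item_in_pair = item
--         else:
--             yield (first_item_in_pair, item)
--
--         is_first_item_in_pair = not is_first_item_in_pair
-- ===== SOURCE B (Python) =====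
-- def iterate_in_pairs(iterator):
--     '''
--     iterates over this iterator in pairs.
--     for example given the iterator [1,2,3,4,5,6], the iterator that will be returned is [(1,2), (3,4), (5,6)]
--     '''
--     it = iter(iterator)
--     yield from zip(it, it)
-- ===== Notes on version B (the rewrite author's own statement) =====
-- stated objective: idiomatic
-- what changed: Replaces the hand-rolled toggle flag and held-over first element with a single shared iterator zipped with itself (yield from zip(it, it)), which groups consecutive elements pairwise.
import Mathlib
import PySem

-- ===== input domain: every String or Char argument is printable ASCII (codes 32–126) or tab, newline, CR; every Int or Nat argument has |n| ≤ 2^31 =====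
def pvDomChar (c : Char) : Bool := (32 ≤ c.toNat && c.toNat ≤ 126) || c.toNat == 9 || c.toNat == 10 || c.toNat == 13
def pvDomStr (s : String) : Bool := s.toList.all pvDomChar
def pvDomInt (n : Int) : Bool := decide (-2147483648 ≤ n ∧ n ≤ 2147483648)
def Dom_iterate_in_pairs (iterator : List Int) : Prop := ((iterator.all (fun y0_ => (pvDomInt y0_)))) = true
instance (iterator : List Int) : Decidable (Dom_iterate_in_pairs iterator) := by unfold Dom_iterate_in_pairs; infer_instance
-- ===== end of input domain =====

-- B replaces A's toggle-flag loop with direct two-at-a-time pairing (idiomatic zip(it, it)).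

-- ===== PORT A =====
-- A's loop: a boolean toggle and a held-over first element; yields (first, item) on the 'else' branch.
def iterate_in_pairs_go (is_first : Bool) (first : Option Int) : List Int → List (Int × Int)
  | [] => []
  | item :: rest =>
    if is_first then
      iterate_in_pairs_go false (some item) rest
    else
      (first.getD 0, item) :: iterate_in_pairs_go true first rest

def iterate_in_pairs (iterator : List Int) : List (Int × Int) :=
  iterate_in_pairs_go true none iterator

-- ===== PORT B =====
-- B's zip(it, it): consume two consecutive elements at a time.
def iterate_in_pairs_alt : List Int → List (Int × Int)
  | a :: b :: rest => (a, b) :: iterate_in_pairs_alt rest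
  | _ => []

-- ===== PRECONDITION & SPEC =====
def Spec_iterate_in_pairs (iterator : List Int) (out : List (Int × Int)) : Prop := out = iterate_in_pairs_alt iterator
instance (iterator : List Int) (out : List (Int × Int)) : Decidable (Spec_iterate_in_pairs iterator out) := by unfold Spec_iterate_in_pairs; infer_instance

-- ===== CLAIM (what is proved, stated in full; the proofs are below) =====
def Claim_equal_iterate_in_pairs : Prop := ∀ (iterator : List Int), Dom_iterate_in_pairs iterator → Spec_iterate_in_pairs iterator (iterate_in_pairs iterator)

-- ===== LEMMAS AND PROOFS =====
theorem iterate_in_pairs_go_eq : ∀ (l : List Int) (f : Option Int),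
    iterate_in_pairs_go true f l = iterate_in_pairs_alt l
  | [], _ => by simp [iterate_in_pairs_go, iterate_in_pairs_alt]
  | [a], _ => by simp [iterate_in_pairs_go, iterate_in_pairs_alt]
  | a :: b :: rest, f => by
      simp [iterate_in_pairs_go, iterate_in_pairs_alt,
        iterate_in_pairs_go_eq rest (some a)]

-- ===== VERDICT (by name: the statement is the Claim_ definition above) =====
theorem iterate_in_pairs_spec : Claim_equal_iterate_in_pairs := by
  intro l _
  unfold Spec_iterate_in_pairs iterate_in_pairs
  exact iterate_in_pairs_go_eq l none
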